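-- pv_equiv track=rewrite | github.com/qloml/fafnir_ai | clients/spectator_gui.py | fmt_bid_summary_plain
-- ===== SOURCE A (Python) =====
-- from typing import Any, Dict, Optional, List, Tuple
--
-- COIN_ORDER = ["gold", "red", "orange", "yellow", "green", "blue"]
--
-- def count_map(stones: List[str]) -> Dict[str, int]:
--     d: Dict[str, int] = {}
--     for s in stones:
--         s = str(s).lower()
--         d[s] = d.get(s, 0) + 1
--     return d
--
-- def fmt_bid_summary_plain(stones: List[str]) -> str:
--     """No emoji (avoid gray emoji issue in Tk). Example: GOLDx1 REDx2"""
--     stones = [str(s).lower() for s in stones]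
--     cm = count_map(stones)
--     parts: List[str] = []
--     for c in COIN_ORDER:
--         n = cm.get(c, 0)
--         if n:
--             parts.append(f"{c.upper()}x{n}")
--     return " ".join(parts) if parts else "-"
-- ===== SOURCE B (Python) =====
-- from typing import List
--
-- COIN_ORDER = ["gold", "red", "orange", "yellow", "green", "blue"]
--
-- def fmt_bid_summary_plain(stones: List[str]) -> str:
--     """Sort the coin ranks, then run-length encode the sorted run in a single pass."""
--     lowered = [str(s).lower() for s in stones]
--     ranks = sorted(COIN_ORDER.index(s) for s in lowered if s in COIN_ORDER)
--     parts: List[str] = []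
--     prev, cnt = None, 0
--     for r in ranks:
--         if r == prev:
--             cnt += 1
--         else:
--             if prev is not None:
--                 parts.append(f"{COIN_ORDER[prev].upper()}x{cnt}")
--             prev, cnt = r, 1
--     if prev is not None:
--         parts.append(f"{COIN_ORDER[prev].upper()}x{cnt}")
--     return " ".join(parts) if parts else "-"
-- ===== Notes on version B (the rewrite author's own statement) =====
-- stated objective: alternative
-- what changed: Instead of tabulating counts in a dict and then reading them off per coin, B maps each stone to its coin rank, sorts the ranks, and run-length encodes the sorted run in a single accumulator pass (sort-then-group vs tabulation).
import Mathlib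
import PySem

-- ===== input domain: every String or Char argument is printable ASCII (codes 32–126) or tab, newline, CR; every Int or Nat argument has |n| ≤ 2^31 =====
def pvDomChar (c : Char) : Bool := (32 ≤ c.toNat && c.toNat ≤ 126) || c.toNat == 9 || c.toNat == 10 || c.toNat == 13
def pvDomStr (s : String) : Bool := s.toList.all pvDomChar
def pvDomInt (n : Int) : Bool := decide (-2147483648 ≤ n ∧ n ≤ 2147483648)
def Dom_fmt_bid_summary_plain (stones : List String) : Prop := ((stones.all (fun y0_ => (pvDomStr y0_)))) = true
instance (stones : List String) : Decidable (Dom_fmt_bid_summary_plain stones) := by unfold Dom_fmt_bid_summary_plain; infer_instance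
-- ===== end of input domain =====

-- B replaces the count_map dict tabulation by a different algorithm: map stones to coin ranks, sort, and run-length encode the sorted run in one pass (objective: alternative).


-- ===== PORT A =====
def COIN_ORDER : List String := ["gold", "red", "orange", "yellow", "green", "blue"]

def count_map (stones : List String) : PySem.Dict String Int :=
  stones.foldl (fun d s => d.modify (PySem.Str.lower s) 0 (· + 1)) PySem.Dict.empty

def fmt_bid_summary_plain (stones : List String) : String :=
  let stones' := stones.map PySem.Str.lower
  let cm := count_map stones'
  let parts := COIN_ORDER.foldl (fun parts c =>
    let n := cm.getD c 0
    if n ≠ 0 then parts ++ [PySem.Str.upper c ++ "x" ++ PySem.Int.toStr n] else parts) []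
  if parts ≠ [] then PySem.Str.join " " parts else "-"

-- ===== PORT B =====
-- f"{COIN_ORDER[p].upper()}x{cnt}"; p is always a valid rank 0..5 here, so the pyGetD default "" is never used
def rlEmit (p : Int) (cnt : Int) : String :=
  PySem.Str.upper (PySem.List.pyGetD COIN_ORDER p "") ++ "x" ++ PySem.Int.toStr cnt

-- one iteration of B's run-length loop, state = (parts, prev, cnt)
def rlStep (st : List String × Option Int × Int) (r : Int) : List String × Option Int × Int :=
  if some r = st.2.1 then (st.1, st.2.1, st.2.2 + 1)
  else match st.2.1 with
    | none => (st.1, some r, 1)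
    | some p => (st.1 ++ [rlEmit p st.2.2], some r, 1)

-- the trailing 'if prev is not None: parts.append(...)'
def rlFinish (st : List String × Option Int × Int) : List String :=
  match st.2.1 with
  | none => st.1
  | some p => st.1 ++ [rlEmit p st.2.2]

def fmt_bid_summary_plain_alt (stones : List String) : String :=
  let lowered := stones.map PySem.Str.lower
  let ranks := PySem.List.sorted
    ((lowered.filter (fun s => COIN_ORDER.contains s)).map
      (fun s => (((PySem.List.index? COIN_ORDER s).getD 0 : Nat) : Int)))
    (fun x => x) false
  let parts := rlFinish (ranks.foldl rlStep ([], none, 0))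
  if parts ≠ [] then PySem.Str.join " " parts else "-"

-- ===== PRECONDITION & SPEC =====
def Spec_fmt_bid_summary_plain (stones : List String) (out : String) : Prop := out = fmt_bid_summary_plain_alt stones
instance (stones : List String) (out : String) : Decidable (Spec_fmt_bid_summary_plain stones out) := by unfold Spec_fmt_bid_summary_plain; infer_instance

-- ===== CLAIM (what is proved, stated in full; the proofs are below) =====
def Claim_equal_fmt_bid_summary_plain : Prop := ∀ (stones : List String), Dom_fmt_bid_summary_plain stones → Spec_fmt_bid_summary_plain stones (fmt_bid_summary_plain stones)

-- ===== LEMMAS AND PROOFS =====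

-- count of coin i (as a rank) in the lowered list
def cI (L : List String) (i : Int) : Int := (L.count (PySem.List.pyGetD COIN_ORDER i "") : Int)

theorem lowerChar_idem (c : Char) : PySem.Chars.lowerChar (PySem.Chars.lowerChar c) = PySem.Chars.lowerChar c := by
  by_cases h : PySem.Chars.isupper c = true
  · have h1 : 65 ≤ c.toNat := by simp [PySem.Chars.isupper] at h; exact h.1
    have h2 : c.toNat ≤ 90 := by simp [PySem.Chars.isupper] at h; exact h.2
    have ht : (Char.ofNat (c.toNat + 32)).toNat = c.toNat + 32 := by
      rw [Char.toNat_ofNat, if_pos (by left; omega)]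
    have hd : PySem.Chars.isupper (Char.ofNat (c.toNat + 32)) = false := by
      simp [PySem.Chars.isupper]
      intro ha
      exact (by omega : 90 < (Char.ofNat (c.toNat + 32)).toNat)
    simp [PySem.Chars.lowerChar, h, hd]
  · simp only [Bool.not_eq_true] at h
    simp [PySem.Chars.lowerChar, h]

theorem lower_idem (s : String) : PySem.Str.lower (PySem.Str.lower s) = PySem.Str.lower s := by
  apply String.toList_injective
  simp [PySem.Str.toList_lower, PySem.Chars.lower, List.map_map, Function.comp_def, lowerChar_idem]

-- the dict built by count_map over an already-lowered list reads back as List.count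
theorem count_map_getD (stones : List String) (c : String) :
    (count_map (stones.map PySem.Str.lower)).getD c 0 = ((stones.map PySem.Str.lower).count c : Int) := by
  have hmap : (stones.map PySem.Str.lower).map PySem.Str.lower = stones.map PySem.Str.lower := by
    simp [List.map_map, Function.comp_def, lower_idem]
  unfold count_map
  have hfm := List.foldl_map (f := PySem.Str.lower) (l := stones.map PySem.Str.lower)
    (g := fun (d : PySem.Dict String Int) x => d.modify x 0 (· + 1)) (init := PySem.Dict.empty)
  rw [← hfm, hmap]
  rw [PySem.Dict.getD_foldl_modify_add_one]
  simp [PySem.Dict.empty, PySem.Dict.getD, PySem.Dict.get?]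

-- B's loop over a run of equal ranks just bumps the counter
theorem rl_rep (n : Nat) (parts : List String) (a c : Int) :
    List.foldl rlStep (parts, some a, c) (List.replicate n a) = (parts, some a, c + n) := by
  induction n generalizing c with
  | zero => simp
  | succ m ih =>
    rw [List.replicate_succ, List.foldl_cons]
    have : rlStep (parts, some a, c) a = (parts, some a, c + 1) := by simp [rlStep]
    rw [this, ih]
    refine Prod.ext rfl (Prod.ext rfl ?_)
    push_cast; ring

-- B's loop over the runs of groups with strictly increasing keys and positive counts
theorem rl_groups (gs : List (Int × Int)) (parts : List String) (a c : Int)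
    (hp : List.Pairwise (· < ·) (a :: gs.map Prod.fst)) (hc : ∀ g ∈ gs, 0 < g.2) :
    rlFinish (List.foldl rlStep (parts, some a, c) (gs.flatMap (fun g => List.replicate g.2.toNat g.1))) =
      parts ++ [rlEmit a c] ++ gs.map (fun g => rlEmit g.1 g.2) := by
  induction gs generalizing parts a c with
  | nil => simp [rlFinish]
  | cons g rest ih =>
    have hag : a < g.1 := (List.pairwise_cons.1 hp).1 _ (by simp)
    have hgpos : 0 < g.2 := hc g (by simp)
    rw [List.flatMap_cons, List.foldl_append]
    have hrep : g.2.toNat = (g.2.toNat - 1) + 1 := by omega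
    have hstep : rlStep (parts, some a, c) g.1 = (parts ++ [rlEmit a c], some g.1, 1) := by
      simp [rlStep]
      intro h
      omega
    rw [hrep, List.replicate_succ, List.foldl_cons, hstep, rl_rep]
    have hcnt : (1 : Int) + ((g.2.toNat - 1 : Nat) : Int) = g.2 := by omega
    rw [hcnt]
    rw [ih (parts ++ [rlEmit a c]) g.1 g.2 ?_ (fun h hm => hc h (by simp [hm]))]
    · simp
    · have := List.pairwise_cons.1 hp
      rcases List.pairwise_cons.1 this.2 with ⟨h1, h2⟩
      exact List.pairwise_cons.2 ⟨h1, h2⟩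

-- whole B loop from the initial state
theorem rl_top (gs : List (Int × Int))
    (hp : List.Pairwise (· < ·) (gs.map Prod.fst)) (hc : ∀ g ∈ gs, 0 < g.2) :
    rlFinish (List.foldl rlStep ([], none, 0) (gs.flatMap (fun g => List.replicate g.2.toNat g.1))) =
      gs.map (fun g => rlEmit g.1 g.2) := by
  cases gs with
  | nil => simp [rlFinish]
  | cons g rest =>
    have hgpos : 0 < g.2 := hc g (by simp)
    rw [List.flatMap_cons, List.foldl_append]
    have hrep : g.2.toNat = (g.2.toNat - 1) + 1 := by omega
    have hstep : rlStep ([], none, 0) g.1 = ([], some g.1, 1) := by simp [rlStep]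
    rw [hrep, List.replicate_succ, List.foldl_cons, hstep, rl_rep]
    have hcnt : (1 : Int) + ((g.2.toNat - 1 : Nat) : Int) = g.2 := by omega
    rw [hcnt]
    rw [rl_groups rest [] g.1 g.2 hp (fun h hm => hc h (by simp [hm]))]
    simp

-- the list of coin ranks present in the input, unsorted
def rawRanks (L : List String) : List Int :=
  (L.filter (fun s => COIN_ORDER.contains s)).map
    (fun s => (((PySem.List.index? COIN_ORDER s).getD 0 : Nat) : Int))

-- sorted ranks, written as runs of equal ranks in increasing order
def flatForm (L : List String) : List Int :=
  ([0, 1, 2, 3, 4, 5] : List Int).flatMap (fun i => List.replicate (cI L i).toNat i)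

-- the common normal form of both programs' parts lists
def commonParts (L : List String) : List String :=
  (([0, 1, 2, 3, 4, 5] : List Int).filter (fun i => decide (cI L i ≠ 0))).map
    (fun i => rlEmit i (cI L i))

theorem idx_point (s : String) (k : Nat) (hk : k < 6) :
    (List.idxOf? s COIN_ORDER).getD 0 = k ∧ s ∈ COIN_ORDER ↔ s = COIN_ORDER[k]?.getD "" := by
  by_cases hs : s ∈ COIN_ORDER
  · fin_cases hs <;> interval_cases k <;> decide
  · constructor
    · rintro ⟨-, hmem⟩; exact absurd hmem hs
    · intro h; exfalso; apply hs; rw [h]; interval_cases k <;> decide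

theorem raw_bounds (L : List String) : ∀ x ∈ rawRanks L, 0 ≤ x ∧ x < 6 := by
  intro x hx
  simp [rawRanks, List.mem_map, List.mem_filter] at hx
  obtain ⟨s, ⟨hmem, hcont⟩, hval⟩ := hx
  have hs : s ∈ COIN_ORDER := hcont
  have hsome : (PySem.List.index? COIN_ORDER s).isSome := (PySem.List.index?_isSome_iff _ _).2 hs
  obtain ⟨k, hk⟩ := Option.isSome_iff_exists.1 hsome
  obtain ⟨hlt, -⟩ := PySem.List.getElem_of_index?_eq_some hk
  have : (PySem.List.index? COIN_ORDER s).getD 0 = k := by rw [hk]; rfl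
  rw [PySem.List.index?_eq_idxOf?] at this
  rw [← hval, this]
  simp [COIN_ORDER] at hlt
  omega

theorem raw_count (L : List String) (k : Nat) (hk : k < 6) :
    (rawRanks L).count ((k : Nat) : Int) = L.count (PySem.List.pyGetD COIN_ORDER (k : Int) "") := by
  unfold rawRanks
  rw [List.count_eq_countP, List.countP_map, List.countP_filter, List.count_eq_countP]
  apply List.countP_congr
  intro s _
  simpa [Function.comp] using idx_point s k hk

theorem raw_perm (L : List String) : (rawRanks L).Perm (flatForm L) := by
  rw [List.perm_iff_count]
  intro a
  by_cases h0 : a = 0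
  · subst h0; simpa [flatForm, List.count_append, List.count_replicate, cI] using raw_count L 0 (by omega)
  by_cases h1 : a = 1
  · subst h1; simpa [flatForm, List.count_append, List.count_replicate, cI] using raw_count L 1 (by omega)
  by_cases h2 : a = 2
  · subst h2; simpa [flatForm, List.count_append, List.count_replicate, cI] using raw_count L 2 (by omega)
  by_cases h3 : a = 3
  · subst h3; simpa [flatForm, List.count_append, List.count_replicate, cI] using raw_count L 3 (by omega)
  by_cases h4 : a = 4
  · subst h4; simpa [flatForm, List.count_append, List.count_replicate, cI] using raw_count L 4 (by omega)
  by_cases h5 : a = 5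
  · subst h5; simpa [flatForm, List.count_append, List.count_replicate, cI] using raw_count L 5 (by omega)
  have hraw : (rawRanks L).count a = 0 := by
    rw [List.count_eq_zero]
    intro hmem
    have := raw_bounds L a hmem
    omega
  rw [hraw]
  have g0 : ¬((0:Int) = a) := fun h => h0 h.symm
  have g1 : ¬((1:Int) = a) := fun h => h1 h.symm
  have g2 : ¬((2:Int) = a) := fun h => h2 h.symm
  have g3 : ¬((3:Int) = a) := fun h => h3 h.symm
  have g4 : ¬((4:Int) = a) := fun h => h4 h.symm
  have g5 : ¬((5:Int) = a) := fun h => h5 h.symm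
  simp [flatForm, List.count_append, List.count_replicate, g0, g1, g2, g3, g4, g5]

theorem flat_pairwise (L : List String) : List.Pairwise (· ≤ ·) (flatForm L) := by
  simp [flatForm, List.pairwise_append, List.mem_replicate, List.pairwise_replicate]
  refine ⟨⟨⟨?_, ?_⟩, ?_⟩, ?_⟩ <;> (intro _ b hb; omega)

theorem sorted_raw (L : List String) :
    PySem.List.sorted (rawRanks L) (fun x => x) false = flatForm L :=
  PySem.List.eq_of_perm_of_pairwise_le_of_injective (fun x => x) (fun _ _ h => h)
    ((PySem.List.sorted_perm _ _ _).trans (raw_perm L))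
    (by simpa using PySem.List.sorted_pairwise (rawRanks L) (fun x => x))
    (flat_pairwise L)

theorem flat_filter (c : Int → Int) (idxs : List Int) :
    (idxs.filter (fun i => decide (c i ≠ 0))).flatMap (fun i => List.replicate (c i).toNat i)
      = idxs.flatMap (fun i => List.replicate (c i).toNat i) := by
  induction idxs with
  | nil => rfl
  | cons i t ih =>
    simp only [ne_eq, decide_not] at ih ⊢
    by_cases hc : c i = 0 <;> simp [hc, ih]

theorem parts_B (L : List String) :
    rlFinish ((PySem.List.sorted (rawRanks L) (fun x => x) false).foldl rlStep ([], none, 0))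
      = commonParts L := by
  rw [sorted_raw]
  have hflat : flatForm L =
      ((([0,1,2,3,4,5] : List Int).filter (fun i => decide (cI L i ≠ 0))).map
        (fun i => (i, cI L i))).flatMap (fun g => List.replicate g.2.toNat g.1) := by
    rw [List.flatMap_map]
    exact (flat_filter (cI L) _).symm
  rw [hflat, rl_top]
  · simp [commonParts, List.map_map, Function.comp]
  · rw [List.map_map]
    have h1 : (Prod.fst ∘ fun i => (i, cI L i)) = fun (i : Int) => i := rfl
    rw [h1]
    have h2 : List.Pairwise (· < ·) ([0,1,2,3,4,5] : List Int) := by decide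
    simpa using List.Pairwise.filter _ h2
  · intro g hg
    simp [List.mem_map, List.mem_filter] at hg
    obtain ⟨i, ⟨-, hne⟩, rfl⟩ := hg
    have : (0:Int) ≤ cI L i := by simp [cI]
    omega

theorem parts_A_eq (L : List String) :
    List.foldl (fun parts c => if (L.count c : Int) ≠ 0 then
        parts ++ [PySem.Str.upper c ++ "x" ++ PySem.Int.toStr (L.count c : Int)] else parts) [] COIN_ORDER
      = commonParts L := by
  have hfun : (fun (parts : List String) c => if (L.count c : Int) ≠ 0 then
        parts ++ [PySem.Str.upper c ++ "x" ++ PySem.Int.toStr (L.count c : Int)] else parts)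
      = (fun parts c => if (fun c => decide ((L.count c : Int) ≠ 0)) c = true then
        parts ++ [(fun c => PySem.Str.upper c ++ "x" ++ PySem.Int.toStr (L.count c : Int)) c] else parts) := by
    funext parts c; simp
  rw [hfun, PySem.List.foldl_append_if]
  have hCO : ([0,1,2,3,4,5] : List Int).map (fun i => PySem.List.pyGetD COIN_ORDER i "") = COIN_ORDER := by decide
  rw [← hCO, List.filter_map, List.map_map]
  rfl

-- ===== VERDICT (by name: the statement is the Claim_ definition above) =====
theorem fmt_bid_summary_plain_spec : Claim_equal_fmt_bid_summary_plain := by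
  intro stones _
  unfold Spec_fmt_bid_summary_plain
  simp only [fmt_bid_summary_plain, fmt_bid_summary_plain_alt]
  have hB := parts_B (stones.map PySem.Str.lower)
  unfold rawRanks at hB
  rw [hB]
  simp only [count_map_getD]
  rw [parts_A_eq (stones.map PySem.Str.lower)]
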